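-- pv_equiv track=rewrite | github.com/yebeike/NeSy-Edge | experiments/rq123_e2e/profile_edge_footprint_20260312.py | _sample_cases_for_payload
-- ===== SOURCE A (Python) =====
-- from typing import Dict, List, Tuple
--
-- def _sample_cases_for_payload(cases: List[Dict[str, object]], per_ds: int = 3) -> List[Dict[str, object]]:
--     by_ds: Dict[str, List[Dict[str, object]]] = {"HDFS": [], "OpenStack": [], "Hadoop": []}
--     for c in cases:
--         ds = str(c.get("dataset", "HDFS"))
--         if ds in by_ds:
--             by_ds[ds].append(c)
--     sampled: List[Dict[str, object]] = []
--     for ds, lst in by_ds.items():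
--         sampled.extend(lst[:per_ds])
--     return sampled
-- ===== SOURCE B (Python) =====
-- def _sample_cases_for_payload(cases, per_ds=3):
--     sampled = []
--     for ds in ("HDFS", "OpenStack", "Hadoop"):
--         sampled.extend([c for c in cases if str(c.get("dataset", "HDFS")) == ds][:per_ds])
--     return sampled
-- ===== Notes on version B (the rewrite author's own statement) =====
-- stated objective: idiomatic
-- what changed: Drops the grouping dict entirely: instead of one pass filling three buckets and then slicing each, B does a fresh filter scan over cases for each dataset in the fixed order and takes the first per_ds matches.
import Mathlib
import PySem

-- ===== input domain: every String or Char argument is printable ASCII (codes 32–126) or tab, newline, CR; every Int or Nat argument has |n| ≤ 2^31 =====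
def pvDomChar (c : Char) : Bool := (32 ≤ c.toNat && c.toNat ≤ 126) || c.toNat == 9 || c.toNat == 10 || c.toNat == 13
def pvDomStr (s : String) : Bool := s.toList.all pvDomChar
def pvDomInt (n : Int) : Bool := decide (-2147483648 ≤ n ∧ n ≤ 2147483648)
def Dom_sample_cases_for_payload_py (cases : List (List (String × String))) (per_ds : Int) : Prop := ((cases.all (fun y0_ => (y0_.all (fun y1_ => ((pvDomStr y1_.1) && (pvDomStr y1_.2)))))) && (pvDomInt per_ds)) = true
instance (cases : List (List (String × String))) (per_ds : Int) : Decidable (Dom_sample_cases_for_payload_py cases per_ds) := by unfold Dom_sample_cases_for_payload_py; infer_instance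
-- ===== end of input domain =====

-- B replaces A's bucket-filling grouping dict with three independent filter scans (idiomatic); same return value.

-- shared helper: str(c.get("dataset", "HDFS")) — the values are strings, so str() is identity
def pvDsKey (c : List (String × String)) : String :=
  PySem.Dict.getD (PySem.Dict.mk c) "dataset" "HDFS"

-- ===== PORT A =====
def sample_cases_for_payload_py (cases : List (List (String × String))) (per_ds : Int) : List (List (String × String)) :=
  let by_ds : PySem.Dict String (List (List (String × String))) :=
    PySem.Dict.mk [("HDFS", []), ("OpenStack", []), ("Hadoop", [])]
  let by_ds := cases.foldl (fun d c =>
    let ds := pvDsKey c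
    if d.contains ds then d.modify ds [] (fun l => l ++ [c]) else d) by_ds
  by_ds.items.foldl (fun sampled p => sampled ++ PySem.List.slice p.2 none (some per_ds)) []

-- ===== PORT B =====
def sample_cases_for_payload_py_alt (cases : List (List (String × String))) (per_ds : Int) : List (List (String × String)) :=
  ["HDFS", "OpenStack", "Hadoop"].foldl (fun sampled ds =>
    sampled ++ PySem.List.slice (cases.filter (fun c => pvDsKey c == ds)) none (some per_ds)) []

-- ===== PRECONDITION & SPEC =====
def Spec_sample_cases_for_payload_py (cases : List (List (String × String))) (per_ds : Int) (out : List (List (String × String))) : Prop := out = sample_cases_for_payload_py_alt cases per_ds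
instance (cases : List (List (String × String))) (per_ds : Int) (out : List (List (String × String))) : Decidable (Spec_sample_cases_for_payload_py cases per_ds out) := by unfold Spec_sample_cases_for_payload_py; infer_instance

-- ===== CLAIM (what is proved, stated in full; the proofs are below) =====
def Claim_equal_sample_cases_for_payload_py : Prop := ∀ (cases : List (List (String × String))) (per_ds : Int), Dom_sample_cases_for_payload_py cases per_ds → Spec_sample_cases_for_payload_py cases per_ds (sample_cases_for_payload_py cases per_ds)

-- ===== LEMMAS AND PROOFS =====

-- A's grouping loop keeps the dict's key list unchanged
lemma pvLoop_keys (l : List (List (String × String)))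
    (d : PySem.Dict String (List (List (String × String)))) :
    (l.foldl (fun d c =>
      let ds := pvDsKey c
      if d.contains ds then d.modify ds [] (fun l => l ++ [c]) else d) d).keys = d.keys := by
  induction l generalizing d with
  | nil => rfl
  | cons c t ih =>
    simp only [List.foldl_cons]
    by_cases h : d.contains (pvDsKey c) = true
    · simp only [h, if_true, ih, PySem.Dict.keys_modify]
      exact PySem.Dict.keys_insert_of_contains _ _ h
    · simp only [Bool.not_eq_true] at h
      simp [h, ih]

-- the bucket of a present key k collects exactly the cases whose dataset is k, in order
lemma pvLoop_getD (l : List (List (String × String)))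
    (d : PySem.Dict String (List (List (String × String)))) (k : String)
    (hk : d.contains k = true) :
    (l.foldl (fun d c =>
      let ds := pvDsKey c
      if d.contains ds then d.modify ds [] (fun l => l ++ [c]) else d) d).getD k []
      = d.getD k [] ++ l.filter (fun c => pvDsKey c == k) := by
  induction l generalizing d with
  | nil => simp
  | cons c t ih =>
    simp only [List.foldl_cons, List.filter_cons]
    by_cases hck : pvDsKey c = k
    · subst hck
      simp only [hk, if_true, beq_self_eq_true]
      rw [ih _ (by simp [PySem.Dict.contains_modify, hk])]
      simp [PySem.Dict.getD_modify_self]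
    · have hbeq : (pvDsKey c == k) = false := by simp [hck]
      simp only [hbeq, Bool.false_eq_true, if_false]
      by_cases h : d.contains (pvDsKey c) = true
      · simp only [h, if_true]
        rw [ih _ (by simp [PySem.Dict.contains_modify, hk])]
        rw [PySem.Dict.getD_modify_of_ne _ _ _ (fun h' => hck h'.symm)]
      · simp only [Bool.not_eq_true] at h
        simp only [h, Bool.false_eq_true, if_false]
        exact ih _ hk

theorem pv_main (cases : List (List (String × String))) (per_ds : Int) :
    sample_cases_for_payload_py cases per_ds = sample_cases_for_payload_py_alt cases per_ds := by
  unfold sample_cases_for_payload_py sample_cases_for_payload_py_alt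
  simp only []
  set d0 : PySem.Dict String (List (List (String × String))) :=
    PySem.Dict.mk [("HDFS", []), ("OpenStack", []), ("Hadoop", [])] with hd0
  set f := (fun (d : PySem.Dict String (List (List (String × String)))) c =>
    let ds := pvDsKey c
    if d.contains ds then d.modify ds [] (fun l => l ++ [c]) else d) with hf
  have hkeys : (cases.foldl f d0).keys = ["HDFS", "OpenStack", "Hadoop"] := by
    rw [pvLoop_keys]; rfl
  have hnd : (cases.foldl f d0).keys.Nodup := by rw [hkeys]; decide
  have hitems : (cases.foldl f d0).items
      = ["HDFS", "OpenStack", "Hadoop"].map (fun k => (k, (cases.foldl f d0).getD k [])) := by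
    rw [PySem.Dict.items_eq_map_keys _ hnd [], hkeys]
  rw [hitems]
  have hget : ∀ k, k ∈ (["HDFS", "OpenStack", "Hadoop"] : List String) →
      (cases.foldl f d0).getD k [] = cases.filter (fun c => pvDsKey c == k) := by
    intro k hkmem
    rw [pvLoop_getD cases d0 k (by fin_cases hkmem <;> decide)]
    have : d0.getD k [] = [] := by fin_cases hkmem <;> decide
    simp [this]
  simp [List.foldl_cons, hget "HDFS" (by simp), hget "OpenStack" (by simp),
    hget "Hadoop" (by simp)]

-- ===== VERDICT (by name: the statement is the Claim_ definition above) =====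
theorem sample_cases_for_payload_py_spec : Claim_equal_sample_cases_for_payload_py := by
  intro cases per_ds _
  unfold Spec_sample_cases_for_payload_py
  exact pv_main cases per_ds
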